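-- pv_equiv track=rewrite | github.com/JungWooChul/Python-Algorithm | 백준/Silver/1105. 팔/팔.py | eight
-- ===== SOURCE A (Python) =====
-- def eight(L, R):
--     answer = 0
--     # 자릿수가 다른 경우 : L = 8, R = 80 -> 8이 들어가지 않는 숫자 무조건 존재
--     if len(L) != len(R):
--         return answer
--
--     for l,r in zip(L,R):
--         if l == r:
--             if l == '8':
--                 answer += 1
--         else:
--             break
--
--     return answer
-- ===== SOURCE B (Python) =====
-- def eight(L, R):
--     if len(L) != len(R):
--         return 0
--     # binary search for the largest k with L[:k] == R[:k]
--     # (prefix equality is monotone in k, so bisection is valid)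
--     lo, hi = 0, len(L)
--     while lo < hi:
--         mid = (lo + hi + 1) // 2
--         if L[:mid] == R[:mid]:
--             lo = mid
--         else:
--             hi = mid - 1
--     return L[:lo].count('8')
-- ===== Notes on version B (the rewrite author's own statement) =====
-- stated objective: alternative
-- what changed: A's fused linear scan with an in-loop counter and break is replaced by a binary search on the prefix length k using slice equality L[:k]==R[:k] (a monotone predicate), followed by counting '8' in L[:lo].
import Mathlib
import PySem

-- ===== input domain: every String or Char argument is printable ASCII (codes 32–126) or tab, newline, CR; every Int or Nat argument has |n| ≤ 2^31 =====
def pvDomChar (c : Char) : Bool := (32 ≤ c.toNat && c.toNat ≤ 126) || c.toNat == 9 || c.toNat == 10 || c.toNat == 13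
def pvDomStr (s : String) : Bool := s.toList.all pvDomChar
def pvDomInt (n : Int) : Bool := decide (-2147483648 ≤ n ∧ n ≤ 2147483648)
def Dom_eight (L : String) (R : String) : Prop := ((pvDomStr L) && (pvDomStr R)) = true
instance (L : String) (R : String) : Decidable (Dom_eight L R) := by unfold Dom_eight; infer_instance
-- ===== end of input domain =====

-- B finds the common-prefix length by binary search on slice equality instead of A's fused linear scan; same return value.
-- ===== PORT A =====
-- literal port of A's for-loop over zip(L,R) with break: structural recursion carrying the accumulator
def eightLoop : List Char → List Char → Int → Int
  | l :: ls, r :: rs, acc =>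
      if l = r then eightLoop ls rs (if l = '8' then acc + 1 else acc) else acc
  | _, _, acc => acc

def eight (L : String) (R : String) : Int :=
  if L.toList.length ≠ R.toList.length then 0
  else eightLoop L.toList R.toList 0

-- ===== PORT B =====
-- the while-loop of Source B: binary search for the largest k with L[:k] == R[:k]
def bsearch (L R : List Char) (lo hi : Nat) : Nat :=
  if h : lo < hi then
    let mid := (lo + hi + 1) / 2
    if L.take mid = R.take mid then bsearch L R mid hi
    else bsearch L R lo (mid - 1)
  else lo
termination_by hi - lo
decreasing_by all_goals omega

def eight_alt (L : String) (R : String) : Int :=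
  if L.toList.length ≠ R.toList.length then 0
  else ((L.toList.take (bsearch L.toList R.toList 0 L.toList.length)).count '8' : Nat)

-- ===== PRECONDITION & SPEC =====
def Spec_eight (L : String) (R : String) (out : Int) : Prop := out = eight_alt L R
instance (L : String) (R : String) (out : Int) : Decidable (Spec_eight L R out) := by unfold Spec_eight; infer_instance

-- ===== CLAIM (what is proved, stated in full; the proofs are below) =====
def Claim_equal_eight : Prop := ∀ (L : String) (R : String), Dom_eight L R → Spec_eight L R (eight L R)

-- ===== LEMMAS AND PROOFS =====

-- length of the longest common prefix
def cpl : List Char → List Char → Nat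
  | l :: ls, r :: rs => if l = r then cpl ls rs + 1 else 0
  | _, _ => 0

theorem cpl_le_left (ls : List Char) : ∀ rs : List Char, cpl ls rs ≤ ls.length := by
  induction ls with
  | nil => intro rs; cases rs <;> simp [cpl]
  | cons l ls ih =>
      intro rs
      cases rs with
      | nil => simp [cpl]
      | cons r rs =>
          by_cases h : l = r <;> simp [cpl, h]
          exact ih rs

theorem take_eq_iff (ls : List Char) : ∀ (rs : List Char) (k : Nat),
    ls.length = rs.length → (ls.take k = rs.take k ↔ min k ls.length ≤ cpl ls rs) := by
  induction ls with
  | nil =>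
      intro rs k hlen
      cases rs with
      | nil => simp
      | cons r rs => simp at hlen
  | cons l ls ih =>
      intro rs k hlen
      cases rs with
      | nil => simp at hlen
      | cons r rs =>
          simp at hlen
          cases k with
          | zero => simp
          | succ k =>
              by_cases h : l = r
              · subst h
                simp [cpl, ih rs k hlen]
              · simp [cpl, h]

-- bsearch returns exactly cpl, under the loop invariant lo ≤ n ≤ hi ≤ |L|
theorem bsearch_eq (L R : List Char) (hlen : L.length = R.length) :
    ∀ (lo hi : Nat), lo ≤ cpl L R → cpl L R ≤ hi → hi ≤ L.length →
      bsearch L R lo hi = cpl L R := by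
  intro lo hi
  induction lo, hi using bsearch.induct L R with
  | case1 lo hi h mid hmid ih =>
      intro h1 h2 h3
      rw [bsearch]
      simp only [h, dite_true]
      have hm : min mid L.length ≤ cpl L R := by
        rw [← take_eq_iff L R mid hlen]; exact hmid
      have : mid ≤ L.length := by omega
      rw [if_pos hmid]
      exact ih (by omega) h2 h3
  | case2 lo hi h mid hmid ih =>
      intro h1 h2 h3
      rw [bsearch]
      simp only [h, dite_true]
      rw [if_neg hmid]
      have hm : ¬ min mid L.length ≤ cpl L R := by
        rw [← take_eq_iff L R mid hlen]; exact hmid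
      have : mid ≤ L.length := by omega
      exact ih h1 (by omega) (by omega)
  | case3 lo hi h =>
      intro h1 h2 h3
      rw [bsearch]
      simp only [h, dite_false]
      omega

-- A's loop = count of '8' in the common prefix (of length cpl)
theorem eightLoop_eq (ls : List Char) : ∀ (rs : List Char) (acc : Int),
    eightLoop ls rs acc = acc + (((ls.take (cpl ls rs)).count '8' : Nat) : Int) := by
  induction ls with
  | nil => intro rs acc; cases rs <;> simp [eightLoop, cpl]
  | cons l ls ih =>
      intro rs acc
      cases rs with
      | nil => simp [eightLoop, cpl]
      | cons r rs =>
          by_cases h : l = r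
          · subst h
            by_cases h8 : l = '8'
            · simp [eightLoop, cpl, h8, ih]
              ring
            · simp [eightLoop, cpl, h8, ih]
          · simp [eightLoop, cpl, h]

-- ===== VERDICT (by name: the statement is the Claim_ definition above) =====
theorem eight_spec : Claim_equal_eight := by
  intro L R _
  unfold Spec_eight eight eight_alt
  split
  · rfl
  · rename_i hlen
    simp only [not_ne_iff] at hlen
    rw [bsearch_eq L.toList R.toList hlen 0 L.toList.length (Nat.zero_le _)
        (cpl_le_left _ _) (le_refl _)]
    simp [eightLoop_eq]
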